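/- GENERATED by mk_final_copies.py from the proof of the farm's unit `start_decoder.F2c` (farm:start_decoder.F2c.1: Proof.lean) as the
   re-elaboration sweep compiled it — do not edit. -/
import Asan.CheckWalk
import Vorbis.Spec.Units.start_decoder_F2c
import Vorbis.Spec.StartDecoderFloor

open X86 X86.User Asan Vorbis Vorbis.Spec Vorbis.Spec.StartDecoder

set_option maxRecDepth 100000
set_option maxHeartbeats 4000000

namespace Vorbis.Spec.start_decoder_F2c

/-- 0x1152e9 – 0x115302 (`mov r12d, eax ; mov rdi, rbx ; call __asan_store1_noabort ; mov [rbx], r12b ; mov r12d, [rsp+24H] ;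
mov r13d, 0xffffffff ; jmp 11545c`): from the return of `get_bits(f, 5)` to the head of loop 3985 with `j = 0`, `max_class = −1`.
The one store is the byte `g->partitions` at offset 0 of the element: `Floor.carry_quiet` with the element's part `[G, G + 1)`. -/
theorem f2c_walk (Lay : Layout) (hLay : Lay.hi = 0x1000000) (μ : Microarch) (hμ : UserX.MicroOK μ) (u₀ : State)
    (hcode : HasCodeNat Lay u₀ Vorbis.L.start_decoder.entry Vorbis.Code.code_start_decoder.nat Vorbis.L.start_decoder.size)
    (hstore1 : Asan.SmallCheck Lay μ Vorbis.WayInv (Vorbis.CodeOK u₀) [.rax, .rdx] 1 Vorbis.L.__asan_store1_noabort.entry)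
    (g : Ghost) (i : Nat) (A5 : Arena) (A : Arena × List Obj) (v : State)
    (h : InF2b u₀ g i A5 A v) : ReachVia Lay μ WayInv v (fun w => AtF2L u₀ g i w) := by
  have hlt : (i : Int) < stb_vorbis.floor_count v.mem g.f := h.lt
  have hgeo := Floor.geo h.loop hlt
  have hgeo0 := hgeo
  obtain ⟨r8, rlo, rhi, ra, flo, fhi, fstack, farena, flog, fc1, fc64, ilt, gdef, blo, bhi, btext, bstack, bdata, blog⟩ := hgeo
  have hfr := h.loop.frame
  -- the steady stack pointer and the element's address: `v.reg .rsp`, `v.reg .rbx` stay the atoms of the walk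
  have hspn : (v.reg .rsp).toNat = g.R := by
    rw [hfr.rsp]
    exact toNat_addr _ (by omega)
  obtain ⟨G, hG⟩ : ∃ G : Nat, G = floorAt g v.mem i := ⟨_, rfl⟩
  rw [← hG] at gdef
  have hgwn : (v.reg .rbx).toNat = G := by
    rw [h.rbx, ← hG]
    exact toNat_addr _ (by omega)
  have w_rip := hfr.rip
  have hrax := h.rax
  have w_eq : Mem.EqOn Vorbis.L.textLo Vorbis.L.textHi u₀.mem v.mem := hfr.code
  have hdf : v.flags .df = false := (show abiInv _ from hfr.inv).1
  have hmx : v.mxcsr &&& 0x1F80 = 0x1F80 := (show abiInv _ from hfr.inv).2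
  have hsse := Vorbis.sseOK_of_abiInv hfr.inv
  -- the literal 0 of `d[R+24H]` (Z24)
  have z24 : v.mem.readLE (v.reg .rsp + 36) 4 = 0 := by
    have hz := h.loop.mid.consts.z24 (by omega) (by omega)
    rw [hfr.rsp]
    simp only [vfield]
    exact hz
  -- THE SLOT'S ADDRESS AS A NUMBER, BEFORE THE WALK: `mov r12d, [rsp+24H]` is read THROUGH the byte store at `[rbx]`; the disjointness
  -- `(rsp + 36).toNat + 4 ≤ rbx.toNat ∨ rbx.toNat + 1 ≤ (rsp + 36).toNat` needs the case split `bstack` and has a `% 2 ^ 64`, on which `omega`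
  -- gives up (the read would stay in `w_r12`, and the `rfl` of the fourth bullet below would evaluate it for minutes). With this equation in the
  -- context the side tactic sees `g.R + 36`.
  have hsp36 : (v.reg .rsp + 36).toNat = g.R + 36 := by
    u_omega
  u_walk hcode [hμ.vendor] until [Vorbis.L.start_decoder.loop18] span [Vorbis.L.textLo, Vorbis.L.textHi] side (v_side)
  case check_1152ef =>
    -- 0x1152ef store1 at offset 0 of the element
    have hun : ShadowUntouched v.mem s_1152ef.mem := by v_untouched
    have hs := Floor.site h.loop hlt 0 1 (by omega) (by simp only [voff]; omega)
    rw [← hG] at hs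
    exact Vorbis.Spec.check_site hfr.shadow hun hs (by u_omega)
  -- 0x11545c: the head of loop 3985. What was written: the return address of the check call, the byte `g->partitions`.
  have hun : ShadowUntouched v.mem s_115302.mem := by v_untouched
  have hsame : Mem.SameExcept
      [⟨(v.reg .rsp).toNat - 8, (v.reg .rsp).toNat⟩, ⟨(v.reg .rbx).toNat, (v.reg .rbx).toNat + 1⟩] v.mem s_115302.mem := by
    u_same
  have hws : ∀ w, w ∈ [(⟨(v.reg .rsp).toNat - 8, (v.reg .rsp).toNat⟩ : Span), ⟨(v.reg .rbx).toNat, (v.reg .rbx).toNat + 1⟩] →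
      Floor.Quiet g (floorAt g v.mem i) 0 1 w := by
    rw [← hG]
    intro w hw
    simp only [List.mem_cons, List.mem_nil_iff, or_false] at hw
    rcases hw with rfl | rfl <;> unfold Floor.Quiet <;> simp only [] <;> omega
  have hrsp' : s_115302.reg .rsp = addr g.R := by
    rw [w_rsp]
    exact hfr.rsp
  have hrbp' : s_115302.reg .rbp = addr g.f := by
    rw [w_kept.get .rbp rfl]
    exact h.loop.rbp
  have hloop' : FloorLoop u₀ g Vorbis.L.start_decoder.loop18 i A5 A s_115302 :=
    Floor.carry_quiet (lo := 0) (hi := 1) h.loop hlt (by omega) w_rip hrsp' hrbp' (by v_inv) w_eq hsame hws hun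
  obtain ⟨eG, ecount, _, etypes⟩ := Floor.fields_same hgeo0 hsame (fun w hw => (hws w hw).win) (by omega)
  refine ReachVia.done (F2.atF2L_zero hloop' ?_ ?_ ?_ ?_ ?_ ?_)
  · rw [ecount]
    exact hlt
  · rw [etypes]
    exact h.FL3
  · rw [w_kept.get .rbx rfl, eG]
    exact h.rbx
  · rw [w_r12]
    rfl
  · rw [w_r13]
    rfl
  · -- FL4: the byte just stored is the low byte of a `get_bits(f, 5)`
    rw [eG]
    simp only [vacc, voff, Nat.add_zero]
    rw [w_mem, h.rbx, Mem.u8_writeLE_same, BitVec.toNat_setWidth, Vorbis.toNat_part32]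
    omega

end Vorbis.Spec.start_decoder_F2c

theorem Vorbis.Spec.Worked.start_decoder_F2c_ok : Vorbis.Spec.start_decoder_F2c.Statement := by
  intro Lay hLay μ hμ u₀ hcode hstore1 g i v hat
  obtain ⟨A5, A, h⟩ := hat
  exact Vorbis.Spec.start_decoder_F2c.f2c_walk Lay hLay μ hμ u₀ hcode hstore1 g i A5 A v h
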